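-- pv_equiv track=rewrite | github.com/Johnsonchan105/AdventOfCode | AOCDay1.py | threeMeasure
-- ===== SOURCE A (Python) =====
-- def threeMeasure(contents, newContents):
--     newContents = []
--     i = 0
--     while(i < len(contents[0]) - 2):
--         sum = contents[0][i] + contents[0][i+1] + contents[0][i+2]
--         newContents.append(sum)
--         i += 1
--     return newContents
-- ===== SOURCE B (Python) =====
-- def threeMeasure(contents, newContents):
--     xs = contents[0]
--     P = [0]
--     for x in xs:
--         P.append(P[-1] + x)
--     return [P[i + 3] - P[i] for i in range(len(xs) - 2)]
-- ===== Notes on version B (the rewrite author's own statement) =====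
-- stated objective: alternative
-- what changed: Replaced per-window recomputation of three elements with a prefix-sum table built once, the result read off as differences P[i+3]-P[i].
import Mathlib
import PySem

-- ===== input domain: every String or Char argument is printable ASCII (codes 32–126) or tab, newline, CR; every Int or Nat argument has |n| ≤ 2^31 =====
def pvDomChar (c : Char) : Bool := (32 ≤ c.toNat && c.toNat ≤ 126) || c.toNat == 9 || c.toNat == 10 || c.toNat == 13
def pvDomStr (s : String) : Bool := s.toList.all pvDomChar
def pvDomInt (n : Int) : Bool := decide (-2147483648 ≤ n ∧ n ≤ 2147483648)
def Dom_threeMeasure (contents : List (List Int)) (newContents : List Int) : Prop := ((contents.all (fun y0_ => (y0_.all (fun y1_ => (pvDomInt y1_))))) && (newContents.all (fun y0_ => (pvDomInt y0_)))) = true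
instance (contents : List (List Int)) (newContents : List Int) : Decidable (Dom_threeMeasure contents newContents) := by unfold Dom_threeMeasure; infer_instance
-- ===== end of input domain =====

-- B replaces per-window three-element recomputation by a prefix-sum table read off as differences (alternative decomposition, same O(n) cost).

-- ===== PORT A =====
-- A's while loop 'i = 0; while i < len(contents[0]) - 2: append(xs[i]+xs[i+1]+xs[i+2]); i += 1'
-- is the fold of the append step over range(0, len-2); indices i, i+1, i+2 are in range there.
def threeMeasure (contents : List (List Int)) (newContents : List Int) : List Int :=
  let xs := (PySem.List.pyGet? contents 0).getD []   -- contents[0]; Pre_ excludes contents = []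
  (PySem.List.pyRange 0 ((xs.length : Int) - 2) 1).foldl
    (fun acc i => acc ++ [PySem.List.pyGetD xs i 0 + PySem.List.pyGetD xs (i+1) 0 + PySem.List.pyGetD xs (i+2) 0]) []

-- ===== PORT B =====
-- Source B's prefix loop: P = [0]; for x in xs: P.append(P[-1] + x)
def pvPrefix (xs : List Int) : List Int :=
  xs.foldl (fun p x => p ++ [PySem.List.pyGetD p (-1) 0 + x]) [0]

def threeMeasure_alt (contents : List (List Int)) (newContents : List Int) : List Int :=
  let xs := (PySem.List.pyGet? contents 0).getD []   -- contents[0]; Pre_ excludes contents = []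
  let P := pvPrefix xs
  (PySem.List.pyRange 0 ((xs.length : Int) - 2) 1).map
    (fun i => PySem.List.pyGetD P (i+3) 0 - PySem.List.pyGetD P i 0)

-- ===== PRECONDITION & SPEC =====
-- A evaluates contents[0], which raises IndexError when contents is empty; B does the same, so Pre_ excludes only that.
def Pre_threeMeasure (contents : List (List Int)) (newContents : List Int) : Prop := contents ≠ []
instance (contents : List (List Int)) (newContents : List Int) : Decidable (Pre_threeMeasure contents newContents) := by unfold Pre_threeMeasure; infer_instance
def pvWitness_threeMeasure : List (List Int) × List Int := ([[1, 2, 3, 4, 5]], [])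

def Spec_threeMeasure (contents : List (List Int)) (newContents : List Int) (out : List Int) : Prop := out = threeMeasure_alt contents newContents
instance (contents : List (List Int)) (newContents : List Int) (out : List Int) : Decidable (Spec_threeMeasure contents newContents out) := by unfold Spec_threeMeasure; infer_instance

-- ===== CLAIM (what is proved, stated in full; the proofs are below) =====
def Claim_equal_threeMeasure : Prop := ∀ (contents : List (List Int)) (newContents : List Int), Dom_threeMeasure contents newContents → Pre_threeMeasure contents newContents → Spec_threeMeasure contents newContents (threeMeasure contents newContents)

-- ===== LEMMAS AND PROOFS =====

-- pure prefix sums, the mathematical shape of pvPrefix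
def pvScan (s : Int) : List Int → List Int
  | [] => []
  | x :: xs => (s + x) :: pvScan (s + x) xs

theorem pvPrefix_loop (xs : List Int) : ∀ (p : List Int) (a : Int),
    xs.foldl (fun p x => p ++ [PySem.List.pyGetD p (-1) 0 + x]) (p ++ [a]) = (p ++ [a]) ++ pvScan a xs := by
  induction xs with
  | nil => simp [pvScan]
  | cons x xs ih =>
    intro p a
    simp only [List.foldl_cons, PySem.List.pyGetD_neg_one_append_singleton, pvScan]
    rw [ih (p ++ [a]) (a + x)]
    simp

theorem pvPrefix_eq (xs : List Int) : pvPrefix xs = 0 :: pvScan 0 xs := by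
  have := pvPrefix_loop xs [] 0
  simpa [pvPrefix] using this

theorem pvScan_getElem? (xs : List Int) : ∀ (s : Int) (k : Nat), k < xs.length →
    (pvScan s xs)[k]? = some (s + ((xs.take (k+1)).sum)) := by
  induction xs with
  | nil => intro s k h; simp at h
  | cons x xs ih =>
    intro s k h
    cases k with
    | zero => simp [pvScan]
    | succ k =>
      simp only [pvScan, List.getElem?_cons_succ]
      rw [ih (s + x) k (by simpa using h)]
      simp [List.take_succ_cons, add_assoc]

-- P[k] = sum of the first k elements, for 0 ≤ k ≤ len xs
theorem pvPrefix_getD (xs : List Int) (k : Nat) (h : k ≤ xs.length) :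
    (pvPrefix xs).getD k 0 = (xs.take k).sum := by
  rw [pvPrefix_eq]
  cases k with
  | zero => simp
  | succ k =>
    have hk : k < xs.length := by omega
    simp only [List.getD, List.getElem?_cons_succ, pvScan_getElem? xs 0 k hk]
    simp

theorem sum_take_three (xs : List Int) (k : Nat) (h : k + 2 < xs.length) :
    (xs.take (k+3)).sum - (xs.take k).sum = xs.getD k 0 + xs.getD (k+1) 0 + xs.getD (k+2) 0 := by
  have h0 : k < xs.length := by omega
  have h1 : k + 1 < xs.length := by omega
  rw [List.take_add_one, List.take_add_one, List.take_add_one]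
  simp [h0, h1, h, List.getD]
  ring

theorem foldl_append_map {α β : Type} (f : α → β) (l : List α) : ∀ (acc : List β),
    l.foldl (fun acc i => acc ++ [f i]) acc = acc ++ l.map f := by
  induction l with
  | nil => simp
  | cons x l ih => intro acc; simp [ih]

-- ===== VERDICT (by name: the statement is the Claim_ definition above) =====
theorem threeMeasure_spec : Claim_equal_threeMeasure := by
  intro contents newContents _ _
  unfold Spec_threeMeasure threeMeasure threeMeasure_alt
  set xs := (PySem.List.pyGet? contents 0).getD [] with hxs
  rw [foldl_append_map]
  simp only [List.nil_append]
  apply List.map_congr_left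
  intro i hi
  rw [PySem.List.mem_pyRange_one] at hi
  obtain ⟨hi0, hi1⟩ := hi
  -- i is a natural number below len - 2
  obtain ⟨k, rfl⟩ : ∃ k : Nat, i = (k : Int) := ⟨i.toNat, (Int.toNat_of_nonneg hi0).symm⟩
  have hk2 : k + 2 < xs.length := by omega
  have hP3 : ((k : Int) + 3) = ((k + 3 : Nat) : Int) := by push_cast; ring
  have hP1 : ((k : Int) + 1) = ((k + 1 : Nat) : Int) := by push_cast; ring
  have hP2 : ((k : Int) + 2) = ((k + 2 : Nat) : Int) := by push_cast; ring
  rw [hP3, hP1, hP2]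
  simp only [PySem.List.pyGetD_natCast]
  rw [pvPrefix_getD xs (k+3) (by omega), pvPrefix_getD xs k (by omega),
      sum_take_three xs k hk2]
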